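-- pv_equiv track=rewrite | github.com/BioGeMT/ParaDISM | src/pipeline/mapper_algo.py | map_insertions
-- ===== SOURCE A (Python) =====
-- from typing import Dict, List, Tuple
--
-- def map_insertions_dp(insertions: List[Tuple], valid_gaps: List[Tuple], max_scenarios: int = 100) -> List[List]:
--     memo = {}
--
--     def dp(i: int, j: int) -> Tuple[int, List]:
--         if i == len(insertions) or j == len(valid_gaps):
--             return (0, [[]])
--
--         if (i, j) in memo:
--             return memo[(i, j)]
--
--         count1, mappings1 = dp(i+1, j)
--         count2, mappings2 = dp(i, j+1)
--
--         insertion_base = insertions[i][1].upper()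
--         gap_valid_bases = valid_gaps[j][1]
--         if insertion_base in gap_valid_bases:
--             count3, mappings3 = dp(i+1, j+1)
--             count3 += 1
--             new_mappings3 = [[(insertions[i][0], valid_gaps[j][0])] + m for m in mappings3]
--         else:
--             count3, new_mappings3 = (0, [])
--
--         max_count = max(count1, count2, count3)
--         mappings = []
--         if count1 == max_count:
--             mappings.extend(mappings1)
--         if count2 == max_count:
--             mappings.extend(mappings2)
--         if count3 == max_count:
--             mappings.extend(new_mappings3)
--
--         if len(mappings) > max_scenarios:
--             mappings = mappings[:max_scenarios]
--
--         memo[(i, j)] = (max_count, mappings)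
--         return memo[(i, j)]
--
--     max_mapped, all_mappings = dp(0, 0)
--
--     unique_mappings = []
--     seen = set()
--     for m in all_mappings[:max_scenarios]:
--         m_sorted = tuple(sorted(m))
--         if m_sorted not in seen:
--             seen.add(m_sorted)
--             unique_mappings.append(m)
--             if len(unique_mappings) >= max_scenarios:
--                 break
--
--     memo.clear()
--     return unique_mappings
--
-- def map_insertions(insertions: List[Tuple], start_msa_pos: int, end_msa_pos: int,
--                   sequence_bases: Dict, gap_bases_dict: Dict, ref_gene: str,
--                   max_scenarios: int = 100) -> List[List]:
--     valid_gaps = []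
--     for pos in range(start_msa_pos + 1, end_msa_pos):
--         if (pos in sequence_bases and
--             sequence_bases[pos][ref_gene] == '-' and
--             pos in gap_bases_dict):
--             valid_gaps.append((pos, gap_bases_dict[pos]))
--
--     if not valid_gaps or not insertions:
--         return [[]]
--
--     return map_insertions_dp(insertions, valid_gaps, max_scenarios)
-- ===== SOURCE B (Python) =====
-- def map_insertions(insertions, start_msa_pos, end_msa_pos,
--                    sequence_bases, gap_bases_dict, ref_gene,
--                    max_scenarios=100):
--     valid_gaps = [(pos, gap_bases_dict[pos])
--                   for pos in range(start_msa_pos + 1, end_msa_pos)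
--                   if pos in sequence_bases
--                   and sequence_bases[pos][ref_gene] == '-'
--                   and pos in gap_bases_dict]
--
--     if not valid_gaps or not insertions:
--         return [[]]
--
--     m = len(valid_gaps)
--     # Bottom-up DP: `below` holds row i+1 (cells j = 0..m); each row is built
--     # right-to-left by prepending, so cur[0] is always cell (i, j+1).
--     below = [(0, [[]])] * (m + 1)
--     for ins_pos, ins_str in reversed(insertions):
--         base = ins_str.upper()
--         cur = [(0, [[]])]
--         for j in range(m - 1, -1, -1):
--             c1, m1 = below[j]
--             c2, m2 = cur[0]
--             if base in valid_gaps[j][1]: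
--                 d = below[j + 1]
--                 c3 = d[0] + 1
--                 nm3 = [[(ins_pos, valid_gaps[j][0])] + t for t in d[1]]
--             else:
--                 c3, nm3 = 0, []
--             best = max(c1, c2, c3)
--             maps = []
--             if c1 == best:
--                 maps = maps + m1
--             if c2 == best:
--                 maps = maps + m2
--             if c3 == best:
--                 maps = maps + nm3
--             if len(maps) > max_scenarios:
--                 maps = maps[:max_scenarios]
--             cur = [(best, maps)] + cur
--         below = cur
--
--     all_mappings = below[0][1]
--     unique_mappings = []
--     seen = set()
--     for mp in all_mappings[:max_scenarios]:
--         key = tuple(sorted(mp))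
--         if key not in seen:
--             seen.add(key)
--             unique_mappings.append(mp)
--             if len(unique_mappings) >= max_scenarios:
--                 break
--     return unique_mappings
-- ===== Notes on version B (the rewrite author's own statement) =====
-- stated objective: alternative
-- what changed: The memoized top-down recursion dp(i,j) of map_insertions_dp is replaced by an iterative bottom-up DP that fills the table one row at a time (row i built right-to-left from row i+1), keeping the same cell formula (max/extend order, prepend, per-cell truncation) and the same final dedup loop.
import Mathlib
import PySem

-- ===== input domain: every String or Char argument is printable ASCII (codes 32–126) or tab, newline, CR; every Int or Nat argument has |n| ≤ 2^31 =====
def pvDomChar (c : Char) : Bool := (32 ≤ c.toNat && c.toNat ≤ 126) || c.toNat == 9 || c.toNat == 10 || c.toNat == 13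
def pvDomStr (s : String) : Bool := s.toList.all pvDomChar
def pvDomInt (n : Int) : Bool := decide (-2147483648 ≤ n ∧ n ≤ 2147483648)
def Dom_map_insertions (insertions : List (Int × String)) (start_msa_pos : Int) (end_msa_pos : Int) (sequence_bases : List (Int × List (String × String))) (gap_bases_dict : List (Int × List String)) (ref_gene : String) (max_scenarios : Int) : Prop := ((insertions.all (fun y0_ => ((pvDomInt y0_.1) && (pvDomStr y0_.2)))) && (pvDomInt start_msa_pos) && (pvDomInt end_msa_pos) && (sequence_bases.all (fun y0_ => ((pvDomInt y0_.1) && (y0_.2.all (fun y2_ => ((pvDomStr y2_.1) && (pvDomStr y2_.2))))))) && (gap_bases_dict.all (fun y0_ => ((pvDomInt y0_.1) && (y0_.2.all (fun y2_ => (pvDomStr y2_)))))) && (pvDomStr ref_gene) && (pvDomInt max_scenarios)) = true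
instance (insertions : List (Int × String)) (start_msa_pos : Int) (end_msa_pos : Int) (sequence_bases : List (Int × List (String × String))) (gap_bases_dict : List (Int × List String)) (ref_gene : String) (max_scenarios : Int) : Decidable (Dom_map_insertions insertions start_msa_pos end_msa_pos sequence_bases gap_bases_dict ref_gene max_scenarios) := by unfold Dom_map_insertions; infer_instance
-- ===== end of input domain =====

-- B re-implements the memoized top-down DP of map_insertions_dp as a bottom-up row-by-row
-- table fill (objective: alternative decomposition, same asymptotic cost); return value only.

-- one DP cell: (count, mappings)
abbrev pvCell : Type := Int × List (List (Int × Int))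

-- shared by both ports (this code is textually identical in both Pythons):
-- the valid-gap test of the comprehension / loop condition
def pvGapCond (sequence_bases : List (Int × List (String × String))) (gap_bases_dict : List (Int × List String)) (ref_gene : String) (pos : Int) : Bool :=
  (PySem.Dict.mk sequence_bases).contains pos &&
  -- sequence_bases[pos][ref_gene] == '-' ; the getD defaults are unreachable under Pre_
  (((PySem.Dict.mk ((PySem.Dict.mk sequence_bases).getD pos [])).getD ref_gene "") == "-") &&
  (PySem.Dict.mk gap_bases_dict).contains pos

def pvGapVal (gap_bases_dict : List (Int × List String)) (pos : Int) : List String :=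
  (PySem.Dict.mk gap_bases_dict).getD pos []

-- the cell-combination lines shared verbatim by A's dp body and B's inner loop:
-- max of the three counts, extend in the order 1,2,3, truncate at max_scenarios
def pvCombine (c1 c2 c3 : pvCell) (maxS : Int) : pvCell :=
  let mc := max (max c1.1 c2.1) c3.1
  let maps := (if c1.1 = mc then c1.2 else []) ++ (if c2.1 = mc then c2.2 else []) ++
              (if c3.1 = mc then c3.2 else [])
  (mc, if (maps.length : Int) > maxS then PySem.List.slice maps none (some maxS) else maps)

-- the "insertion base matches the gap" branch: (count3+1, prepend the pair) else (0, [])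
def pvDiag (ins1 : Int) (base : String) (g : Int × List String) (d : pvCell) : pvCell :=
  if g.2.contains base then (d.1 + 1, d.2.map (fun mp => (ins1, g.1) :: mp)) else (0, [])

-- the final dedup-by-sorted-tuple loop with early break (textually identical in both Pythons)
def pvDedup (maxS : Int) : List (List (Int × Int)) → PySem.Set (List (Int × Int)) → List (List (Int × Int)) → List (List (Int × Int))
  | [], _, acc => acc
  | mp :: rest, seen, acc =>
    let key := PySem.List.sorted2 mp (fun p => p.1) (fun p => p.2)
    if PySem.Set.contains seen key then pvDedup maxS rest seen acc
    else
      let acc' := acc ++ [mp]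
      if (acc'.length : Int) ≥ maxS then acc' else pvDedup maxS rest (PySem.Set.add seen key) acc'

-- ===== PORT A =====
-- dp(i, j) with the memo dict threaded through; the '≥' in the base test is only a
-- totality guard (all reachable calls have i ≤ len, j ≤ len, where '≥' is '==')
def dpA (ins : List (Int × String)) (gaps : List (Int × List String)) (maxS : Int) (i j : Nat) (memo : PySem.Dict (Nat × Nat) pvCell) : pvCell × PySem.Dict (Nat × Nat) pvCell :=
  if _h : i ≥ ins.length ∨ j ≥ gaps.length then ((0, [[]]), memo)
  else
    match memo.get? (i, j) with
    | some v => (v, memo)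
    | none =>
      let p1 := dpA ins gaps maxS (i+1) j memo
      let p2 := dpA ins gaps maxS i (j+1) p1.2
      let base := PySem.Str.upper (ins.getD i (0, "")).2
      let p3 : pvCell × PySem.Dict (Nat × Nat) pvCell :=
        if (gaps.getD j (0, [])).2.contains base then
          let q := dpA ins gaps maxS (i+1) (j+1) p2.2
          (pvDiag (ins.getD i (0, "")).1 base (gaps.getD j (0, [])) q.1, q.2)
        else ((0, []), p2.2)
      let cell := pvCombine p1.1 p2.1 p3.1 maxS
      (cell, p3.2.insert (i, j) cell)
termination_by (ins.length - i) + (gaps.length - j)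
decreasing_by all_goals omega

def map_insertions (insertions : List (Int × String)) (start_msa_pos : Int) (end_msa_pos : Int) (sequence_bases : List (Int × List (String × String))) (gap_bases_dict : List (Int × List String)) (ref_gene : String) (max_scenarios : Int) : List (List (Int × Int)) :=
  -- the for-pos loop appending to valid_gaps
  let valid_gaps := (PySem.List.pyRange (start_msa_pos + 1) end_msa_pos).foldl
    (fun acc pos => if pvGapCond sequence_bases gap_bases_dict ref_gene pos then
        acc ++ [(pos, pvGapVal gap_bases_dict pos)] else acc) []
  if valid_gaps.isEmpty || insertions.isEmpty then [[]]
  else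
    -- map_insertions_dp: dp(0,0) with an empty memo, then the dedup loop
    let r := dpA insertions valid_gaps max_scenarios 0 0 PySem.Dict.empty
    pvDedup max_scenarios (PySem.List.slice r.1.2 none (some max_scenarios)) PySem.Set.empty []

-- ===== PORT B =====
-- build row i (cells j = m-k .. m, right to left, prepending) from row i+1 (`below`)
def rowStep (ins1 : Int) (base : String) (gaps : List (Int × List String)) (maxS : Int) (below : List pvCell) : Nat → List pvCell
  | 0 => [(0, [[]])]
  | k + 1 =>
    let cur := rowStep ins1 base gaps maxS below k
    let j := gaps.length - (k + 1)
    let c1 := below.getD j (0, [[]])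
    let c2 := cur.headD (0, [[]])
    let c3 := pvDiag ins1 base (gaps.getD j (0, [])) (below.getD (j + 1) (0, [[]]))
    pvCombine c1 c2 c3 maxS :: cur

def map_insertions_alt (insertions : List (Int × String)) (start_msa_pos : Int) (end_msa_pos : Int) (sequence_bases : List (Int × List (String × String))) (gap_bases_dict : List (Int × List String)) (ref_gene : String) (max_scenarios : Int) : List (List (Int × Int)) :=
  -- the list comprehension
  let valid_gaps := ((PySem.List.pyRange (start_msa_pos + 1) end_msa_pos).filter
      (pvGapCond sequence_bases gap_bases_dict ref_gene)).map
      (fun pos => (pos, pvGapVal gap_bases_dict pos))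
  if valid_gaps.isEmpty || insertions.isEmpty then [[]]
  else
    let m := valid_gaps.length
    -- for ins in reversed(insertions): below := the new row
    let final := insertions.foldr
      (fun e below => rowStep e.1 (PySem.Str.upper e.2) valid_gaps max_scenarios below m)
      (List.replicate (m + 1) (0, [[]]))
    pvDedup max_scenarios (PySem.List.slice (final.headD (0, [[]])).2 none (some max_scenarios)) PySem.Set.empty []

-- ===== PRECONDITION & SPEC =====
-- Pre_ excludes exactly the inputs where Python A raises KeyError: a position inside
-- range(start+1, end) present in sequence_bases whose inner dict lacks ref_gene.
def Pre_map_insertions (insertions : List (Int × String)) (start_msa_pos : Int) (end_msa_pos : Int) (sequence_bases : List (Int × List (String × String))) (gap_bases_dict : List (Int × List String)) (ref_gene : String) (max_scenarios : Int) : Prop :=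
  ∀ pr ∈ sequence_bases, (start_msa_pos + 1 ≤ pr.1 ∧ pr.1 < end_msa_pos) →
    (((PySem.Dict.mk sequence_bases).getD pr.1 []).map (fun q => q.1)).contains ref_gene = true
instance (insertions : List (Int × String)) (start_msa_pos : Int) (end_msa_pos : Int) (sequence_bases : List (Int × List (String × String))) (gap_bases_dict : List (Int × List String)) (ref_gene : String) (max_scenarios : Int) : Decidable (Pre_map_insertions insertions start_msa_pos end_msa_pos sequence_bases gap_bases_dict ref_gene max_scenarios) := by unfold Pre_map_insertions; infer_instance

def pvWitness_map_insertions : (List (Int × String)) × Int × Int × (List (Int × List (String × String))) × (List (Int × List String)) × String × Int :=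
  ([(5, "a")], 0, 3, [(1, [("g", "-")])], [(1, ["A"])], "g", 100)

def Spec_map_insertions (insertions : List (Int × String)) (start_msa_pos : Int) (end_msa_pos : Int) (sequence_bases : List (Int × List (String × String))) (gap_bases_dict : List (Int × List String)) (ref_gene : String) (max_scenarios : Int) (out : List (List (Int × Int))) : Prop := out = map_insertions_alt insertions start_msa_pos end_msa_pos sequence_bases gap_bases_dict ref_gene max_scenarios
instance (insertions : List (Int × String)) (start_msa_pos : Int) (end_msa_pos : Int) (sequence_bases : List (Int × List (String × String))) (gap_bases_dict : List (Int × List String)) (ref_gene : String) (max_scenarios : Int) (out : List (List (Int × Int))) : Decidable (Spec_map_insertions insertions start_msa_pos end_msa_pos sequence_bases gap_bases_dict ref_gene max_scenarios out) := by unfold Spec_map_insertions; infer_instance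

-- ===== CLAIM (what is proved, stated in full; the proofs are below) =====
def Claim_equal_map_insertions : Prop := ∀ (insertions : List (Int × String)) (start_msa_pos : Int) (end_msa_pos : Int) (sequence_bases : List (Int × List (String × String))) (gap_bases_dict : List (Int × List String)) (ref_gene : String) (max_scenarios : Int), Dom_map_insertions insertions start_msa_pos end_msa_pos sequence_bases gap_bases_dict ref_gene max_scenarios → Pre_map_insertions insertions start_msa_pos end_msa_pos sequence_bases gap_bases_dict ref_gene max_scenarios → Spec_map_insertions insertions start_msa_pos end_msa_pos sequence_bases gap_bases_dict ref_gene max_scenarios (map_insertions insertions start_msa_pos end_msa_pos sequence_bases gap_bases_dict ref_gene max_scenarios)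

-- ===== LEMMAS AND PROOFS =====

theorem pvWitness_ok : Dom_map_insertions pvWitness_map_insertions.1 pvWitness_map_insertions.2.1 pvWitness_map_insertions.2.2.1 pvWitness_map_insertions.2.2.2.1 pvWitness_map_insertions.2.2.2.2.1 pvWitness_map_insertions.2.2.2.2.2.1 pvWitness_map_insertions.2.2.2.2.2.2 ∧ Pre_map_insertions pvWitness_map_insertions.1 pvWitness_map_insertions.2.1 pvWitness_map_insertions.2.2.1 pvWitness_map_insertions.2.2.2.1 pvWitness_map_insertions.2.2.2.2.1 pvWitness_map_insertions.2.2.2.2.2.1 pvWitness_map_insertions.2.2.2.2.2.2 := by decide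

-- the memo-free value of dp(i, j) (proof device, not a port)
def dpPure (ins : List (Int × String)) (gaps : List (Int × List String)) (maxS : Int) (i j : Nat) : pvCell :=
  if i ≥ ins.length ∨ j ≥ gaps.length then (0, [[]])
  else
    pvCombine (dpPure ins gaps maxS (i+1) j) (dpPure ins gaps maxS i (j+1))
      (pvDiag (ins.getD i (0, "")).1 (PySem.Str.upper (ins.getD i (0, "")).2)
        (gaps.getD j (0, [])) (dpPure ins gaps maxS (i+1) (j+1))) maxS
termination_by (ins.length - i) + (gaps.length - j)
decreasing_by all_goals omega

def ValidMemo (ins : List (Int × String)) (gaps : List (Int × List String)) (maxS : Int) (memo : PySem.Dict (Nat × Nat) pvCell) : Prop :=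
  ∀ k v, memo.get? k = some v → v = dpPure ins gaps maxS k.1 k.2

theorem dpA_eq (ins : List (Int × String)) (gaps : List (Int × List String)) (maxS : Int) :
    ∀ (fuel i j : Nat) (memo : PySem.Dict (Nat × Nat) pvCell),
      (ins.length - i) + (gaps.length - j) ≤ fuel → ValidMemo ins gaps maxS memo →
      (dpA ins gaps maxS i j memo).1 = dpPure ins gaps maxS i j ∧
      ValidMemo ins gaps maxS (dpA ins gaps maxS i j memo).2 := by
  intro fuel
  induction fuel with
  | zero =>
    intro i j memo hf hv
    have hguard : i ≥ ins.length ∨ j ≥ gaps.length := by omega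
    rw [dpA, dpPure]
    simp [hguard, hv]
  | succ f ih =>
    intro i j memo hf hv
    by_cases hguard : i ≥ ins.length ∨ j ≥ gaps.length
    · rw [dpA, dpPure]; simp [hguard, hv]
    · rw [dpA]
      simp only [hguard, dite_false]
      rcases hm : memo.get? (i, j) with _ | v
      · have h1 := ih (i+1) j memo (by omega) hv
        have h2 := ih i (j+1) (dpA ins gaps maxS (i+1) j memo).2 (by omega) h1.2
        by_cases hc : (gaps.getD j (0, [])).2.contains (PySem.Str.upper (ins.getD i (0, "")).2)
        · have h3 := ih (i+1) (j+1) (dpA ins gaps maxS i (j+1) (dpA ins gaps maxS (i+1) j memo).2).2 (by omega) h2.2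
          simp only [hc, if_true]
          have hcell : pvCombine (dpA ins gaps maxS (i+1) j memo).1
              (dpA ins gaps maxS i (j+1) (dpA ins gaps maxS (i+1) j memo).2).1
              (pvDiag (ins.getD i (0, "")).1 (PySem.Str.upper (ins.getD i (0, "")).2)
                (gaps.getD j (0, []))
                (dpA ins gaps maxS (i+1) (j+1) (dpA ins gaps maxS i (j+1) (dpA ins gaps maxS (i+1) j memo).2).2).1) maxS
              = dpPure ins gaps maxS i j := by
            rw [h1.1, h2.1, h3.1]
            conv_rhs => rw [dpPure]
            rw [if_neg hguard]
          refine ⟨hcell, ?_⟩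
          intro k v hk
          rw [PySem.Dict.get?_insert] at hk
          split at hk
          · next heq => subst heq; exact (Option.some.inj hk) ▸ hcell
          · exact h3.2 k v hk
        · have hd : pvDiag (ins.getD i (0, "")).1 (PySem.Str.upper (ins.getD i (0, "")).2)
              (gaps.getD j (0, [])) (dpPure ins gaps maxS (i+1) (j+1)) = ((0, []) : pvCell) := by
            unfold pvDiag; rw [if_neg hc]
          simp only [hc, if_false]  -- select the else branch
          have hcell : pvCombine (dpA ins gaps maxS (i+1) j memo).1
              (dpA ins gaps maxS i (j+1) (dpA ins gaps maxS (i+1) j memo).2).1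
              ((0, []) : pvCell) maxS = dpPure ins gaps maxS i j := by
            rw [h1.1, h2.1]
            conv_rhs => rw [dpPure]
            rw [if_neg hguard, hd]
          refine ⟨hcell, ?_⟩
          intro k v hk
          rw [PySem.Dict.get?_insert] at hk
          split at hk
          · next heq => subst heq; exact (Option.some.inj hk) ▸ hcell
          · exact h2.2 k v hk
      · exact ⟨hv _ _ hm, hv⟩

def pvRows (ins : List (Int × String)) (gaps : List (Int × List String)) (maxS : Int) (i : Nat) : List pvCell :=
  (List.range (gaps.length + 1)).map (fun j => dpPure ins gaps maxS i j)

theorem rowStep_eq (ins : List (Int × String)) (gaps : List (Int × List String)) (maxS : Int)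
    (i : Nat) (hi : i < ins.length) :
    ∀ (k : Nat), k ≤ gaps.length →
      rowStep (ins.getD i (0, "")).1 (PySem.Str.upper (ins.getD i (0, "")).2) gaps maxS (pvRows ins gaps maxS (i+1)) k
      = (List.range (k + 1)).map (fun t => dpPure ins gaps maxS i (gaps.length - k + t)) := by
  intro k
  induction k with
  | zero =>
    intro _
    have h0 : dpPure ins gaps maxS i gaps.length = ((0, [[]]) : pvCell) := by
      rw [dpPure]; simp
    rw [rowStep]
    simp [h0]
  | succ k ihk =>
    intro hk
    have hcur := ihk (by omega)
    have hj1 : gaps.length - (k + 1) + 1 = gaps.length - k := by omega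
    have hc1 : (pvRows ins gaps maxS (i+1)).getD (gaps.length - (k+1)) (0, [[]])
        = dpPure ins gaps maxS (i+1) (gaps.length - (k+1)) := by
      unfold pvRows; exact PySem.List.getD_map_range _ _ _ _ (by omega)
    have hc3 : (pvRows ins gaps maxS (i+1)).getD (gaps.length - (k+1) + 1) (0, [[]])
        = dpPure ins gaps maxS (i+1) (gaps.length - (k+1) + 1) := by
      unfold pvRows; exact PySem.List.getD_map_range _ _ _ _ (by omega)
    have hc2 : (((List.range (k+1)).map (fun t => dpPure ins gaps maxS i (gaps.length - k + t))).headD (0, [[]]))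
        = dpPure ins gaps maxS i (gaps.length - (k+1) + 1) := by
      rw [List.range_succ_eq_map]
      simp only [List.map_cons, List.headD_cons]
      congr 1
      omega
    have hcell : pvCombine (dpPure ins gaps maxS (i+1) (gaps.length - (k+1)))
        (dpPure ins gaps maxS i (gaps.length - (k+1) + 1))
        (pvDiag (ins.getD i (0, "")).1 (PySem.Str.upper (ins.getD i (0, "")).2)
          (gaps.getD (gaps.length - (k+1)) (0, []))
          (dpPure ins gaps maxS (i+1) (gaps.length - (k+1) + 1))) maxS
        = dpPure ins gaps maxS i (gaps.length - (k+1)) := by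
      conv_rhs => rw [dpPure]
      rw [if_neg (show ¬(i ≥ ins.length ∨ gaps.length - (k+1) ≥ gaps.length) by omega)]
    rw [rowStep, hcur, hc1, hc2, hc3, hcell]
    conv_rhs => rw [List.range_succ_eq_map]
    simp only [List.map_cons, List.map_map]
    congr 1
    apply List.map_congr_left
    intro t ht
    simp only [Function.comp]
    congr 1
    omega

theorem foldr_rows (gaps : List (Int × List String)) (maxS : Int) :
    ∀ (tl pre ins : List (Int × String)), ins = pre ++ tl →
      tl.foldr (fun e below => rowStep e.1 (PySem.Str.upper e.2) gaps maxS below gaps.length)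
        (List.replicate (gaps.length + 1) (0, [[]]))
      = pvRows ins gaps maxS pre.length := by
  intro tl
  induction tl with
  | nil =>
    intro pre ins h
    have hlen : pre.length = ins.length := by simp [h]
    have hall : ∀ j ∈ List.range (gaps.length + 1),
        dpPure ins gaps maxS pre.length j = ((0, [[]]) : pvCell) := by
      intro j _
      rw [dpPure]
      simp [hlen]
    unfold pvRows
    rw [List.map_congr_left hall, List.map_const', List.length_range]
    rfl
  | cons e tl ih =>
    intro pre ins h
    have h' : ins = (pre ++ [e]) ++ tl := by simp [h]
    have hi : pre.length < ins.length := by rw [h]; simp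
    have he : ins.getD pre.length (0, "") = e := by
      rw [h]
      simp [List.getD]
    simp only [List.foldr_cons]
    rw [ih (pre ++ [e]) ins h']
    have hlen : (pre ++ [e]).length = pre.length + 1 := by simp
    rw [hlen, ← he]
    rw [rowStep_eq ins gaps maxS pre.length hi gaps.length (le_refl _)]
    unfold pvRows
    apply List.map_congr_left
    intro t _
    congr 1
    omega

theorem rows_headD (ins : List (Int × String)) (gaps : List (Int × List String)) (maxS : Int) :
    (pvRows ins gaps maxS 0).headD (0, [[]]) = dpPure ins gaps maxS 0 0 := by
  unfold pvRows
  rw [List.range_succ_eq_map]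
  simp

-- ===== VERDICT (by name: the statement is the Claim_ definition above) =====
theorem map_insertions_spec : Claim_equal_map_insertions := by
  intro insertions start_msa_pos end_msa_pos sequence_bases gap_bases_dict ref_gene max_scenarios _ _
  unfold Spec_map_insertions map_insertions map_insertions_alt
  simp only [PySem.List.foldl_append_if, List.nil_append]
  by_cases hempty : (((PySem.List.pyRange (start_msa_pos + 1) end_msa_pos).filter
      (pvGapCond sequence_bases gap_bases_dict ref_gene)).map
      (fun pos => (pos, pvGapVal gap_bases_dict pos))).isEmpty || insertions.isEmpty
  · simp only [hempty, if_true]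
  · simp only [hempty, if_false]
    have hA := dpA_eq insertions
      (((PySem.List.pyRange (start_msa_pos + 1) end_msa_pos).filter
        (pvGapCond sequence_bases gap_bases_dict ref_gene)).map
        (fun pos => (pos, pvGapVal gap_bases_dict pos))) max_scenarios
      (insertions.length + (((PySem.List.pyRange (start_msa_pos + 1) end_msa_pos).filter
        (pvGapCond sequence_bases gap_bases_dict ref_gene)).map
        (fun pos => (pos, pvGapVal gap_bases_dict pos))).length + 1) 0 0 PySem.Dict.empty
      (by omega) (by intro k v hk; rw [PySem.Dict.get?_empty] at hk; exact absurd hk (by simp))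
    rw [hA.1]
    rw [foldr_rows _ _ insertions [] insertions rfl]
    rw [show ([] : List (Int × String)).length = 0 from rfl]
    rw [rows_headD]
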